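-- pv_equiv track=rewrite | github.com/TessFerrandez/algorithms | hash-table/lc-e-2062-count-vowel-substrings-of-a-string.py | countVowelSubstrings1
-- ===== SOURCE A (Python) =====
-- def countVowelSubstrings1(word: str) -> int:
--     '''
--     S = start, L = left, R = right/current
--       SL    R
--     xxaiioueiiaxx   1
--       SL     R
--     xxaiioueiiaxx   1
--       S   L   R
--     xxaiioueiiaxx   4
--
--     S = marks the start of an all-wovel substring
--     R = right/current position
--     The window between Left - 1 and Right is the smallest window
--     with all 5 vowels
--     '''
--     counts = {'a': 0, 'e': 0, 'i': 0, 'o': 0, 'u': 0}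
--     sub_strings, vowels = 0, 0
--     start, left = 0, 0
--
--     for right, ch in enumerate(word):
--         # we got a vowel
--         if ch in counts:
--             counts[ch] += 1
--
--             # found a new vowel
--             if counts[ch] == 1:
--                 vowels += 1
--
--             # shrink form left while we still have 5 vowels
--             while vowels == 5:
--                 counts[word[left]] -= 1
--                 if counts[word[left]] == 0:
--                     vowels -= 1
--                 left += 1
--
--             # count the sub_strings we found
--             sub_strings += left - start
--
--         # no vowel - reset all
--         else:
--             counts = {'a': 0, 'e': 0, 'i': 0, 'o': 0, 'u': 0}
--             vowels = 0
--             start = left = right + 1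
--
--     return sub_strings
-- ===== SOURCE B (Python) =====
-- def countVowelSubstrings1(word: str) -> int:
--     # For each end position r, walk backwards while we still see vowels,
--     # counting every start whose window already holds all five vowels.
--     total = 0
--     for r in range(len(word)):
--         seen = set()
--         for ch in reversed(word[:r + 1]):
--             if ch not in "aeiou":
--                 break
--             seen.add(ch)
--             if len(seen) == 5:
--                 total += 1
--     return total
-- ===== Notes on version B (the rewrite author's own statement) =====
-- stated objective: alternative
-- what changed: A's single amortized sliding-window pass (left pointer, vowel-count dict, run resets) is replaced by a nested scan: for each end position r, walk backwards while characters are vowels, maintaining a set of vowels seen, and count every start whose window already holds all five.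
import Mathlib
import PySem

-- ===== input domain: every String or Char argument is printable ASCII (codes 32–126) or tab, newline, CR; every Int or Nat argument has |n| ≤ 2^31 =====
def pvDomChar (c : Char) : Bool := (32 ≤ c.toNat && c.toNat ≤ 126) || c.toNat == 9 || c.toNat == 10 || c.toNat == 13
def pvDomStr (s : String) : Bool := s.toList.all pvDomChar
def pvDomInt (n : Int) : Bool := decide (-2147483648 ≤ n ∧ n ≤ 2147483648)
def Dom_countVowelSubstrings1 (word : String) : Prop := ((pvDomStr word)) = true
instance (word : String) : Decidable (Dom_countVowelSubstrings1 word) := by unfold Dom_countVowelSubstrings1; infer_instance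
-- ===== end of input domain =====

-- B replaces A's amortized sliding-window pass by a per-end-position backward scan
-- (nested expansion); objective: alternative — same values, a different algorithm.

-- ===== PORT A =====
/-- `{'a': 0, 'e': 0, 'i': 0, 'o': 0, 'u': 0}` -/
def pvInitCounts : PySem.Dict Char Int :=
  PySem.Dict.ofList [('a', 0), ('e', 0), ('i', 0), ('o', 0), ('u', 0)]

/-- the `while vowels == 5:` shrink loop of A; the fuel only bounds the iterations
    (each one advances `left`, so `cs.length + 1` never runs out on reachable states). -/
def pvShrinkA (cs : List Char) : Nat → PySem.Dict Char Int → Int → Int →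
    PySem.Dict Char Int × Int × Int
  | 0, counts, vowels, left => (counts, vowels, left)
  | fuel + 1, counts, vowels, left =>
    if vowels == 5 then
      match PySem.List.pyGet? cs left with
      | none => (counts, vowels, left)      -- unreachable: `left` is in range whenever vowels == 5
      | some c =>
        let counts := counts.modify c 0 (· - 1)
        let vowels := if counts.getD c 0 == 0 then vowels - 1 else vowels
        pvShrinkA cs fuel counts vowels (left + 1)
    else (counts, vowels, left)

/-- one iteration of A's `for right, ch in enumerate(word):` body;
    state = (counts, sub_strings, vowels, start, left). -/
def pvStepA (cs : List Char)
    (st : PySem.Dict Char Int × Int × Int × Int × Int) (p : Int × Char) :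
    PySem.Dict Char Int × Int × Int × Int × Int :=
  let (counts, subs, vowels, start, left) := st
  let (right, ch) := p
  if counts.contains ch then
    let counts := counts.modify ch 0 (· + 1)
    let vowels := if counts.getD ch 0 == 1 then vowels + 1 else vowels
    let (counts, vowels, left) := pvShrinkA cs (cs.length + 1) counts vowels left
    (counts, subs + (left - start), vowels, start, left)
  else
    (pvInitCounts, subs, 0, right + 1, right + 1)

def countVowelSubstrings1 (word : String) : Int :=
  let cs := word.toList
  ((PySem.List.enumerate cs 0).foldl (pvStepA cs) (pvInitCounts, 0, 0, 0, 0)).2.1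

-- ===== PORT B =====
def pvVowChars : List Char := ['a', 'e', 'i', 'o', 'u']

/-- B's inner loop: `for ch in reversed(word[:r+1]): …` with `break` on a non-vowel. -/
def pvVowelRun (total : Int) (seen : PySem.Set Char) : List Char → Int
  | [] => total
  | ch :: rest =>
    if pvVowChars.contains ch then
      let seen := PySem.Set.add seen ch
      let total := if PySem.Set.len seen == 5 then total + 1 else total
      pvVowelRun total seen rest
    else total

def countVowelSubstrings1_alt (word : String) : Int :=
  let cs := word.toList
  (List.range cs.length).foldl
    (fun total r => pvVowelRun total PySem.Set.empty ((cs.take (r + 1)).reverse)) 0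

-- ===== PRECONDITION & SPEC =====
def Spec_countVowelSubstrings1 (word : String) (out : Int) : Prop := out = countVowelSubstrings1_alt word
instance (word : String) (out : Int) : Decidable (Spec_countVowelSubstrings1 word out) := by unfold Spec_countVowelSubstrings1; infer_instance

-- ===== CLAIM (what is proved, stated in full; the proofs are below) =====
def Claim_equal_countVowelSubstrings1 : Prop := ∀ (word : String), Dom_countVowelSubstrings1 word → Spec_countVowelSubstrings1 word (countVowelSubstrings1 word)

-- ===== LEMMAS AND PROOFS =====

/-- the window `word[m:k]` that A's dict `counts` describes. -/
def pvWin (cs : List Char) (m k : Nat) : List Char := (cs.take k).drop m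

/-- number of distinct vowels occurring in `w` (what A's `vowels` variable tracks). -/
def pvDv (w : List Char) : Nat := (w.toFinset ∩ pvVowChars.toFinset).card

/-- B's partial sum after the outer loop has handled `r = 0 … k-1`. -/
def pvBpart (cs : List Char) (k : Nat) : Int :=
  (List.range k).foldl
    (fun total r => pvVowelRun total PySem.Set.empty ((cs.take (r + 1)).reverse)) 0

/-- invariant tying A's loop state after `k` processed characters to B's partial sum:
    `start = s` marks the current all-vowel run, `left = l` is the shrunken window start,
    `counts`/`vowels` describe `word[l:k]`, and `sub_strings` equals B's partial sum. -/
def pvInv (cs : List Char) (k : Nat)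
    (st : PySem.Dict Char Int × Int × Int × Int × Int) : Prop :=
  ∃ s l : Nat,
    st.2.2.2.1 = (s : Int) ∧ st.2.2.2.2 = (l : Int) ∧
    s ≤ l ∧ l ≤ k ∧ k ≤ cs.length ∧
    (∀ i (hi : i < cs.length), s ≤ i → i < k → cs[i] ∈ pvVowChars) ∧
    (s = 0 ∨ ∃ hs : s - 1 < cs.length, cs[s - 1] ∉ pvVowChars) ∧
    (∀ c ∈ pvVowChars, st.1.getD c 0 = ((pvWin cs l k).count c : Int)) ∧
    (∀ c, st.1.contains c = decide (c ∈ pvVowChars)) ∧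
    st.2.2.1 = (pvDv (pvWin cs l k) : Int) ∧
    pvDv (pvWin cs l k) ≠ 5 ∧
    (∀ m, s ≤ m → m < l → pvDv (pvWin cs m k) = 5) ∧
    st.2.1 = pvBpart cs k

lemma pvDv_le_five (w : List Char) : pvDv w ≤ 5 := by
  have h : (w.toFinset ∩ pvVowChars.toFinset).card ≤ pvVowChars.toFinset.card :=
    Finset.card_le_card Finset.inter_subset_right
  simpa [pvDv, pvVowChars] using h

lemma pvDv_nil : pvDv [] = 0 := by simp [pvDv]

lemma pvWin_nil (cs : List Char) (k : Nat) : pvWin cs k k = [] := by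
  simp [pvWin]

lemma pvWin_cons (cs : List Char) (m k : Nat) (hm : m < k) (hk : k ≤ cs.length)
    (hml : m < cs.length) : pvWin cs m k = cs[m] :: pvWin cs (m + 1) k := by
  unfold pvWin
  rw [List.drop_eq_getElem_cons (by simp; omega)]
  simp [List.getElem_take]

lemma pvWin_snoc (cs : List Char) (l k : Nat) (hl : l ≤ k) (hk : k < cs.length) :
    pvWin cs l (k + 1) = pvWin cs l k ++ [cs[k]] := by
  unfold pvWin
  rw [List.take_add_one, List.drop_append_of_le_length (by simp; omega)]
  simp [List.getElem?_eq_getElem hk]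

lemma pvWin_mem_vow (cs : List Char) (s k : Nat) (hk : k ≤ cs.length)
    (hrun : ∀ i (hi : i < cs.length), s ≤ i → i < k → cs[i] ∈ pvVowChars) :
    ∀ c ∈ pvWin cs s k, c ∈ pvVowChars := by
  intro c hc
  unfold pvWin at hc
  obtain ⟨j, hj, hcj⟩ := List.mem_iff_getElem.1 hc
  rw [List.getElem_drop, List.getElem_take] at hcj
  subst hcj
  have hjl : s + j < cs.length := by
    have := hj; simp [List.length_drop, List.length_take] at this; omega
  apply hrun _ hjl (by omega)
  have := hj; simp [List.length_drop, List.length_take] at this; omega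

lemma pvDv_cons (c : Char) (w : List Char) (hc : c ∈ pvVowChars) :
    pvDv (c :: w) = pvDv w + (if c ∈ w then 0 else 1) := by
  unfold pvDv
  rw [List.toFinset_cons, Finset.insert_inter_of_mem (by simpa using hc)]
  by_cases h : c ∈ w
  · rw [Finset.insert_eq_self.2 (by simp [h, hc])]
    simp [h]
  · rw [Finset.card_insert_of_notMem (by simp [h])]
    simp [h]

lemma pvDv_snoc (c : Char) (w : List Char) (hc : c ∈ pvVowChars) :
    pvDv (w ++ [c]) = pvDv w + (if c ∈ w then 0 else 1) := by
  unfold pvDv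
  rw [List.toFinset_append]
  have h0 : (w.toFinset ∪ [c].toFinset) = insert c w.toFinset := by
    simp
  rw [h0, Finset.insert_inter_of_mem (by simpa using hc)]
  by_cases h : c ∈ w
  · rw [Finset.insert_eq_self.2 (by simp [h, hc])]
    simp [h]
  · rw [Finset.card_insert_of_notMem (by simp [h])]
    simp [h]

lemma pvDv_reverse (w : List Char) : pvDv w.reverse = pvDv w := by
  simp [pvDv]

lemma pvDv_win_anti (cs : List Char) (l m k : Nat) (h : l ≤ m) :
    pvDv (pvWin cs m k) ≤ pvDv (pvWin cs l k) := by
  unfold pvDv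
  apply Finset.card_le_card
  apply Finset.inter_subset_inter_right
  intro c hc
  simp only [List.mem_toFinset] at *
  have heq : pvWin cs m k = (pvWin cs l k).drop (m - l) := by
    unfold pvWin; rw [List.drop_drop]; congr 1; omega
  exact List.mem_of_mem_drop (heq ▸ hc)

lemma pvLen_ofList (w : List Char) (hw : ∀ c ∈ w, c ∈ pvVowChars) :
    (PySem.Set.ofList w).length = pvDv w := by
  unfold pvDv
  rw [Finset.inter_eq_left.2 (by intro c hc; simp only [List.mem_toFinset] at *; exact hw c hc)]
  have h1 : (PySem.Set.ofList w).toFinset = w.toFinset := by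
    ext c; simp [PySem.Set.mem_ofList]
  rw [← h1, List.toFinset_card_of_nodup (PySem.Set.nodup_ofList (xs := w))]

lemma pvVowelRun_acc (u : List Char) : ∀ (t : Int) (seen : PySem.Set Char),
    pvVowelRun t seen u = t + pvVowelRun 0 seen u := by
  induction u with
  | nil => intro t seen; simp [pvVowelRun]
  | cons c rest ih =>
    intro t seen
    simp only [pvVowelRun]
    split
    · split
      · rw [ih (t+1), ih (0+1)]; ring
      · exact ih t _
    · simp

lemma pvVowelRun_stop (u : List Char) : ∀ (rest : List Char) (t : Int) (seen : PySem.Set Char),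
    (rest = [] ∨ ∃ c r', rest = c :: r' ∧ c ∉ pvVowChars) →
    pvVowelRun t seen (u ++ rest) = pvVowelRun t seen u := by
  induction u with
  | nil =>
    intro rest t seen h
    rcases h with rfl | ⟨c, r', rfl, hc⟩
    · rfl
    · simp [pvVowelRun, hc]
  | cons d u' ih =>
    intro rest t seen h
    simp only [List.cons_append, pvVowelRun]
    split
    · exact ih rest _ _ h
    · rfl

lemma pvNodupVowLen (s : List Char) (hnd : s.Nodup) (hsub : ∀ c ∈ s, c ∈ pvVowChars) :
    s.length ≤ 5 := by
  rw [← List.toFinset_card_of_nodup hnd]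
  have h : s.toFinset ⊆ pvVowChars.toFinset := by
    intro c hc; simp only [List.mem_toFinset] at *; exact hsub c hc
  have := Finset.card_le_card h
  simpa [pvVowChars] using this

lemma pvUpdateFull (s : PySem.Set Char) (xs : List Char) (hnd : s.Nodup)
    (hsub : ∀ c ∈ s, c ∈ pvVowChars) (hxs : ∀ c ∈ xs, c ∈ pvVowChars)
    (hlen : s.length = 5) : (PySem.Set.update s xs).length = 5 := by
  have h1 : (PySem.Set.update s xs).length ≤ 5 := by
    apply pvNodupVowLen _ (PySem.Set.nodup_update s xs hnd)
    intro c hc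
    rcases (PySem.Set.mem_update s xs c).1 hc with h | h
    · exact hsub c h
    · exact hxs c h
  have h2 : s.length ≤ (PySem.Set.update s xs).length := by
    rw [PySem.Set.update_eq_append_filter]
    simp
  omega

lemma pvVowelRun_threshold (u : List Char) : ∀ (seen : PySem.Set Char) (t : Int) (T : Nat),
    (∀ c ∈ u, c ∈ pvVowChars) → seen.Nodup → (∀ c ∈ seen, c ∈ pvVowChars) → T ≤ u.length →
    (∀ j : Nat, j < u.length →
      (((PySem.Set.update seen (u.take (j + 1))).length = 5) ↔ T ≤ j)) →
    pvVowelRun t seen u = t + ((u.length : Int) - (T : Int)) := by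
  induction u with
  | nil =>
    intro seen t T _ _ _ hT _
    obtain rfl : T = 0 := by simpa using hT
    simp [pvVowelRun]
  | cons c u' ih =>
    intro seen t T hu hnd hsub hT hchar
    have hc : c ∈ pvVowChars := hu c (by simp)
    have hcont : pvVowChars.contains c = true := by simpa [List.contains_iff_mem] using hc
    have hadd0 : PySem.Set.update seen ((c :: u').take 1) = PySem.Set.add seen c := by
      simp [PySem.Set.update_cons, PySem.Set.update_nil]
    have hch0 := hchar 0 (by simp)
    rw [hadd0] at hch0
    have hnd' : (PySem.Set.add seen c).Nodup := PySem.Set.nodup_add seen c hnd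
    have hsub' : ∀ d ∈ PySem.Set.add seen c, d ∈ pvVowChars := by
      intro d hd
      rcases (PySem.Set.mem_add seen c d).1 hd with h | rfl
      · exact hsub d h
      · exact hc
    have hu' : ∀ d ∈ u', d ∈ pvVowChars := fun d hd => hu d (by simp [hd])
    simp only [pvVowelRun, hcont, if_true]
    rcases Nat.eq_zero_or_pos T with rfl | hTpos
    · have h5 : (PySem.Set.add seen c).length = 5 := hch0.2 (Nat.le_refl 0)
      have hbeq : (PySem.Set.len (PySem.Set.add seen c) == (5 : Int)) = true := by
        simp [PySem.Set.len, h5]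
      rw [if_pos hbeq]
      rw [ih (PySem.Set.add seen c) (t + 1) 0 hu' hnd' hsub' (Nat.zero_le _)
        (fun j hj => by
          constructor
          · intro _; exact Nat.zero_le _
          · intro _
            apply pvUpdateFull _ _ hnd' hsub' _ h5
            intro d hd; exact hu' d (List.mem_of_mem_take hd))]
      simp only [List.length_cons]
      push_cast
      ring
    · obtain ⟨T', rfl⟩ : ∃ T', T = T' + 1 := ⟨T - 1, by omega⟩
      have h5 : ¬ (PySem.Set.add seen c).length = 5 := by
        intro h; have := hch0.1 h; omega
      have hbeq : (PySem.Set.len (PySem.Set.add seen c) == (5 : Int)) = false := by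
        simp only [PySem.Set.len]
        simp only [beq_eq_false_iff_ne, ne_eq]
        exact_mod_cast h5
      rw [if_neg (show ¬((PySem.Set.add seen c).len == (5:Int)) = true by rw [hbeq]; simp)]
      rw [ih (PySem.Set.add seen c) t T' hu' hnd' hsub' (by simpa using hT)
        (fun j hj => by
          have := hchar (j + 1) (by simpa using Nat.succ_lt_succ hj)
          rw [List.take_succ_cons, PySem.Set.update_cons] at this
          rw [this]
          omega)]
      simp only [List.length_cons]
      push_cast
      ring

lemma pvVowelRun_eval (cs : List Char) (s l' k : Nat) (hk : k < cs.length)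
    (hsl : s ≤ l') (hlk : l' ≤ k + 1)
    (hrun : ∀ i (hi : i < cs.length), s ≤ i → i < k + 1 → cs[i] ∈ pvVowChars)
    (hmax : s = 0 ∨ ∃ hs : s - 1 < cs.length, cs[s - 1] ∉ pvVowChars)
    (h5 : ∀ m, s ≤ m → m < l' → pvDv (pvWin cs m (k + 1)) = 5)
    (hnot5 : pvDv (pvWin cs l' (k + 1)) ≠ 5) :
    pvVowelRun 0 PySem.Set.empty ((cs.take (k + 1)).reverse) = (l' : Int) - (s : Int) := by
  have hk1 : k + 1 ≤ cs.length := hk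
  have hsk : s ≤ k + 1 := le_trans hsl hlk
  have hsplit : cs.take (k + 1) = cs.take s ++ pvWin cs s (k + 1) := by
    unfold pvWin
    conv_lhs => rw [← List.take_append_drop s (cs.take (k + 1))]
    rw [List.take_take]
    congr 2
    omega
  have hulen : (pvWin cs s (k + 1)).length = k + 1 - s := by
    unfold pvWin
    simp [List.length_drop, List.length_take]
    omega
  have hrest : (cs.take s).reverse = [] ∨
      ∃ c r', (cs.take s).reverse = c :: r' ∧ c ∉ pvVowChars := by
    rcases hmax with rfl | ⟨hs, hnv⟩
    · left; simp
    · rcases Nat.eq_zero_or_pos s with rfl | hspos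
      · left; simp
      · right
        refine ⟨cs[s-1], (cs.take (s-1)).reverse, ?_, hnv⟩
        have : cs.take s = cs.take (s-1) ++ [cs[s-1]] := by
          conv_lhs => rw [show s = (s-1)+1 by omega]
          rw [List.take_add_one]
          simp [List.getElem?_eq_getElem hs]
        rw [this, List.reverse_append]
        simp
  rw [hsplit, List.reverse_append, pvVowelRun_stop _ _ _ _ hrest]
  have hvow : ∀ c ∈ (pvWin cs s (k+1)).reverse, c ∈ pvVowChars := by
    intro c hc
    exact pvWin_mem_vow cs s (k+1) hk1 hrun c (List.mem_reverse.1 hc)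
  rw [pvVowelRun_threshold _ PySem.Set.empty 0 ((k+1) - l') hvow (by simp [PySem.Set.empty])
    (by simp [PySem.Set.empty]) (by simp [hulen]; omega) ?_]
  · simp only [List.length_reverse, hulen]
    push_cast [Nat.cast_sub (by omega : l' ≤ k+1), Nat.cast_sub (by omega : s ≤ k+1)]
    ring
  · intro j hj
    simp only [List.length_reverse, hulen] at hj
    have htake : ((pvWin cs s (k+1)).reverse).take (j+1)
        = (pvWin cs (k - j) (k+1)).reverse := by
      rw [List.take_reverse]
      congr 1
      unfold pvWin
      rw [List.drop_drop]
      congr 1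
      simp only [List.length_drop, List.length_take]
      omega
    rw [htake]
    have hupd : PySem.Set.update (PySem.Set.empty) ((pvWin cs (k - j) (k+1)).reverse)
        = PySem.Set.ofList ((pvWin cs (k - j) (k+1)).reverse) := by
      exact PySem.Set.update_nil_left _
    rw [hupd, pvLen_ofList _ (by
      intro c hc
      exact pvWin_mem_vow cs (k-j) (k+1) hk1
        (fun i hi h1 h2 => hrun i hi (by omega) h2) c (List.mem_reverse.1 hc))]
    rw [pvDv_reverse]
    constructor
    · intro hdv
      by_contra hcon
      have hkj : l' ≤ k - j := by omega
      have := pvDv_win_anti cs l' (k - j) (k+1) hkj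
      have h4 := pvDv_le_five (pvWin cs l' (k+1))
      omega
    · intro hTj
      exact h5 (k - j) (by omega) (by omega)

lemma pvShrinkA_spec (cs : List Char) (k' : Nat) (hk' : k' ≤ cs.length) :
    ∀ (fuel : Nat) (l : Nat) (counts : PySem.Dict Char Int) (vowels : Int),
    l ≤ k' → k' - l ≤ fuel →
    (∀ i (hi : i < cs.length), l ≤ i → i < k' → cs[i] ∈ pvVowChars) →
    (∀ c ∈ pvVowChars, counts.getD c 0 = ((pvWin cs l k').count c : Int)) →
    (∀ c, counts.contains c = decide (c ∈ pvVowChars)) →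
    vowels = (pvDv (pvWin cs l k') : Int) →
    ∃ (counts' : PySem.Dict Char Int) (vowels' : Int) (l' : Nat),
      pvShrinkA cs fuel counts vowels (l : Int) = (counts', vowels', (l' : Int)) ∧
      l ≤ l' ∧ l' ≤ k' ∧
      (∀ c ∈ pvVowChars, counts'.getD c 0 = ((pvWin cs l' k').count c : Int)) ∧
      (∀ c, counts'.contains c = decide (c ∈ pvVowChars)) ∧
      vowels' = (pvDv (pvWin cs l' k') : Int) ∧
      pvDv (pvWin cs l' k') ≠ 5 ∧
      (∀ m, l ≤ m → m < l' → pvDv (pvWin cs m k') = 5) := by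
  intro fuel
  induction fuel with
  | zero =>
    intro l counts vowels hlk hfuel hrun hget hcon hv
    refine ⟨counts, vowels, l, rfl, le_refl _, hlk, hget, hcon, hv, ?_, fun m h1 h2 => by omega⟩
    have hlk2 : l = k' := by omega
    rw [hlk2, pvWin_nil, pvDv_nil]; omega
  | succ fuel ih =>
    intro l counts vowels hlk hfuel hrun hget hcon hv
    by_cases hdv : pvDv (pvWin cs l k') = 5
    · -- loop body runs
      have hlt : l < k' := by
        rcases Nat.lt_or_ge l k' with h | h
        · exact h
        · exfalso
          obtain rfl : l = k' := by omega
          rw [pvWin_nil, pvDv_nil] at hdv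
          omega
      have hll : l < cs.length := by omega
      have hbeq : (vowels == (5 : Int)) = true := by
        rw [hv, hdv]; simp
      have hpg : PySem.List.pyGet? cs (l : Int) = some cs[l] := by
        rw [PySem.List.pyGet?_natCast, List.getElem?_eq_getElem hll]
      set c := cs[l] with hc
      have hcv : c ∈ pvVowChars := hrun l hll (le_refl _) hlt
      have hwin : pvWin cs l k' = c :: pvWin cs (l + 1) k' := pvWin_cons cs l k' hlt hk' hll
      simp only [pvShrinkA, hbeq, if_true, hpg]
      set w2 := pvWin cs (l + 1) k' with hw2
      have hgetc : (counts.modify c 0 (· - 1)).getD c 0 = (w2.count c : Int) := by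
        rw [PySem.Dict.getD_modify_self, hget c hcv, hwin]
        simp only [List.count_cons_self]
        push_cast
        ring
      have hget2 : ∀ d ∈ pvVowChars, (counts.modify c 0 (· - 1)).getD d 0 = (w2.count d : Int) := by
        intro d hd
        by_cases hdc : d = c
        · subst hdc; exact hgetc
        · rw [PySem.Dict.getD_modify, if_neg hdc, hget d hd, hwin,
            List.count_cons_of_ne (Ne.symm hdc)]
      have hcon2 : ∀ d, (counts.modify c 0 (· - 1)).contains d = decide (d ∈ pvVowChars) := by
        intro d
        rw [PySem.Dict.contains_modify, hcon d]
        by_cases hdc : d = c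
        · subst hdc; simp [hcv]
        · simp [hdc]
      have hdvw2 : pvDv (c :: w2) = pvDv w2 + (if c ∈ w2 then 0 else 1) := pvDv_cons c w2 hcv
      have hvown : (if (counts.modify c 0 (· - 1)).getD c 0 == 0 then vowels - 1 else vowels)
          = (pvDv w2 : Int) := by
        rw [hgetc, hv, hwin, hdvw2]
        by_cases hm : c ∈ w2
        · rw [if_neg (by simp [List.count_eq_zero, hm])]
          simp [hm]
        · rw [if_pos (by simp [List.count_eq_zero, hm])]
          simp only [hm, if_false]
          push_cast
          ring
      rw [hvown]
      have := ih (l + 1) (counts.modify c 0 (· - 1)) ((pvDv w2 : Int))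
        (by omega) (by omega)
        (fun i hi h1 h2 => hrun i hi (by omega) h2)
        hget2 hcon2 rfl
      obtain ⟨counts', vowels', l', heq, h1, h2, h3, h4, h5, h6, h7⟩ := this
      refine ⟨counts', vowels', l', ?_, by omega, h2, h3, h4, h5, h6, ?_⟩
      · rw [show ((l : Int) + 1) = ((l + 1 : Nat) : Int) by push_cast; ring]
        exact heq
      · intro m hm1 hm2
        rcases Nat.eq_or_lt_of_le hm1 with rfl | hlt2
        · exact hdv
        · exact h7 m (by omega) hm2
    · -- exit
      have hbeq : (vowels == (5 : Int)) = false := by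
        rw [hv]
        simp only [beq_eq_false_iff_ne, ne_eq]
        intro h
        exact hdv (by exact_mod_cast h)
      simp only [pvShrinkA, hbeq, Bool.false_eq_true, if_false]
      exact ⟨counts, vowels, l, rfl, le_refl _, hlk, hget, hcon, hv, hdv, fun m h1 h2 => by omega⟩

lemma pvInit_getD : ∀ c ∈ pvVowChars, pvInitCounts.getD c 0 = 0 := by
  intro c hc
  fin_cases hc <;> rfl

lemma pvInit_contains (c : Char) : pvInitCounts.contains c = decide (c ∈ pvVowChars) := by
  by_cases h1 : c = 'a'; · subst h1; rfl
  by_cases h2 : c = 'e'; · subst h2; rfl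
  by_cases h3 : c = 'i'; · subst h3; rfl
  by_cases h4 : c = 'o'; · subst h4; rfl
  by_cases h5 : c = 'u'; · subst h5; rfl
  have g1 : ('a' == c) = false := beq_eq_false_iff_ne.mpr (Ne.symm h1)
  have g2 : ('e' == c) = false := beq_eq_false_iff_ne.mpr (Ne.symm h2)
  have g3 : ('i' == c) = false := beq_eq_false_iff_ne.mpr (Ne.symm h3)
  have g4 : ('o' == c) = false := beq_eq_false_iff_ne.mpr (Ne.symm h4)
  have g5 : ('u' == c) = false := beq_eq_false_iff_ne.mpr (Ne.symm h5)
  have hitems : pvInitCounts.items = [('a',0),('e',0),('i',0),('o',0),('u',0)] := by rfl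
  simp [PySem.Dict.contains, hitems, g1, g2, g3, g4, g5, pvVowChars, h1, h2, h3, h4, h5]

lemma pvBpart_succ (cs : List Char) (k : Nat) :
    pvBpart cs (k + 1) = pvBpart cs k + pvVowelRun 0 PySem.Set.empty ((cs.take (k + 1)).reverse) := by
  unfold pvBpart
  rw [List.range_succ, List.foldl_append]
  simp only [List.foldl_cons, List.foldl_nil]
  exact pvVowelRun_acc _ _ _

lemma pvStepA_inv (cs : List Char) (k : Nat) (hk : k < cs.length)
    (st : PySem.Dict Char Int × Int × Int × Int × Int) (h : pvInv cs k st) :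
    pvInv cs (k + 1) (pvStepA cs st ((k : Int), cs[k])) := by
  obtain ⟨counts, subs, vowels, start, left⟩ := st
  obtain ⟨s, l, hstart, hleft, hsl, hlk, hkn, hrun, hmax, hget, hcon, hvow, hnot5, hmin, hsubs⟩ := h
  simp only at hstart hleft hget hcon hvow hsubs
  subst hstart hleft hvow hsubs
  set ch := cs[k] with hch
  by_cases hv : ch ∈ pvVowChars
  · -- vowel branch
    have hcontrue : counts.contains ch = true := by rw [hcon]; simp [hv]
    have hsnoc : pvWin cs l (k + 1) = pvWin cs l k ++ [ch] := pvWin_snoc cs l k hlk hk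
    have hget2 : ∀ d ∈ pvVowChars,
        (counts.modify ch 0 (· + 1)).getD d 0 = ((pvWin cs l (k + 1)).count d : Int) := by
      intro d hd
      rw [hsnoc, List.count_append]
      by_cases hdc : d = ch
      · subst hdc
        rw [PySem.Dict.getD_modify_self, hget _ hd]
        simp
      · rw [PySem.Dict.getD_modify, if_neg hdc, hget d hd]
        have : [ch].count d = 0 := by
          simp [List.count_singleton]
          exact fun hh => hdc (by simp [hh])
        rw [this]
        simp
    have hcon2 : ∀ d, (counts.modify ch 0 (· + 1)).contains d = decide (d ∈ pvVowChars) := by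
      intro d
      rw [PySem.Dict.contains_modify, hcon d]
      by_cases hdc : d = ch
      · subst hdc; simp [hv]
      · simp [hdc]
    have hc1 : (pvWin cs l (k + 1)).count ch = (pvWin cs l k).count ch + 1 := by
      rw [hsnoc, List.count_append]
      simp
    have hdveq : pvDv (pvWin cs l (k + 1))
        = pvDv (pvWin cs l k) + (if ch ∈ pvWin cs l k then 0 else 1) := by
      rw [hsnoc]
      exact pvDv_snoc ch _ hv
    have hvow2 : (if (counts.modify ch 0 (· + 1)).getD ch 0 == 1
          then (pvDv (pvWin cs l k) : Int) + 1 else (pvDv (pvWin cs l k) : Int))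
        = (pvDv (pvWin cs l (k + 1)) : Int) := by
      rw [hget2 ch hv]
      by_cases hm : ch ∈ pvWin cs l k
      · have h1 : 0 < (pvWin cs l k).count ch := List.count_pos_iff.2 hm
        rw [if_neg (by simp only [hc1, beq_iff_eq]; push_cast; omega)]
        rw [hdveq]
        simp [hm]
      · have h1 : (pvWin cs l k).count ch = 0 := List.count_eq_zero.2 hm
        rw [if_pos (by simp only [hc1, beq_iff_eq, h1]; simp)]
        rw [hdveq]
        simp only [hm]
        push_cast
        ring
    have hrun2 : ∀ i (hi : i < cs.length), l ≤ i → i < k + 1 → cs[i] ∈ pvVowChars := by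
      intro i hi h1 h2
      rcases Nat.lt_or_ge i k with h3 | h3
      · exact hrun i hi (le_trans hsl h1) h3
      · have : i = k := by omega
        subst this
        exact hv
    obtain ⟨counts', vowels', l', heq, hll', hl'k, hget', hcon', hvow', hnot5', hmin'⟩ :=
      pvShrinkA_spec cs (k + 1) (by omega) (cs.length + 1) l
        (counts.modify ch 0 (· + 1))
        ((if (counts.modify ch 0 (· + 1)).getD ch 0 == 1
            then (pvDv (pvWin cs l k) : Int) + 1 else (pvDv (pvWin cs l k) : Int)))
        (by omega) (by omega) hrun2 hget2 hcon2 hvow2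
    have hrunS : ∀ i (hi : i < cs.length), s ≤ i → i < k + 1 → cs[i] ∈ pvVowChars := by
      intro i hi h1 h2
      rcases Nat.lt_or_ge i k with h3 | h3
      · exact hrun i hi h1 h3
      · have : i = k := by omega
        subst this
        exact hv
    have hminS : ∀ m, s ≤ m → m < l' → pvDv (pvWin cs m (k + 1)) = 5 := by
      intro m h1 h2
      rcases Nat.lt_or_ge m l with h3 | h3
      · have h4 : pvDv (pvWin cs m k) = 5 := hmin m h1 h3
        have h5 : pvWin cs m (k + 1) = pvWin cs m k ++ [ch] := pvWin_snoc cs m k (by omega) hk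
        have h6 := pvDv_snoc ch (pvWin cs m k) hv
        have h7 := pvDv_le_five (pvWin cs m (k + 1))
        rw [h5, h6, h4]
        rw [h5, h6, h4] at h7
        split at h7 <;> split <;> omega
      · exact hmin' m h3 h2
    simp only [pvStepA, hcontrue, if_true, heq]
    refine ⟨s, l', rfl, rfl, by omega, by omega, by omega, hrunS, hmax,
      hget', hcon', hvow', hnot5', hminS, ?_⟩
    simp only []
    rw [pvBpart_succ,
      pvVowelRun_eval cs s l' k hk (by omega) (by omega) hrunS hmax hminS hnot5']
  · -- non-vowel branch
    have hconfalse : counts.contains ch = false := by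
      rw [hcon]
      simp [hv]
    simp only [pvStepA, hconfalse, Bool.false_eq_true, if_false]
    have htk : cs.take (k + 1) = cs.take k ++ [ch] := by
      rw [List.take_add_one, List.getElem?_eq_getElem hk]
      rfl
    have hrevk : (cs.take (k + 1)).reverse = ch :: (cs.take k).reverse := by
      rw [htk, List.reverse_append]
      rfl
    refine ⟨k + 1, k + 1, by push_cast; ring, by push_cast; ring, le_refl _, le_refl _,
      by omega, ?_, ?_, ?_, pvInit_contains, ?_, ?_, ?_, ?_⟩
    · intro i hi h1 h2
      omega
    · right
      refine ⟨by simpa using hk, ?_⟩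
      simpa using hv
    · intro c hc
      rw [pvWin_nil]
      simp [pvInit_getD c hc]
    · simp [pvWin_nil, pvDv_nil]
    · rw [pvWin_nil, pvDv_nil]
      omega
    · intro m h1 h2
      omega
    · simp only []
      rw [pvBpart_succ, hrevk]
      have : pvVowelRun 0 PySem.Set.empty (ch :: (cs.take k).reverse) = 0 := by
        simp only [pvVowelRun]
        rw [if_neg (by simp [hv])]
      rw [this]
      ring

lemma pvInv_le (cs : List Char) (k : Nat)
    (st : PySem.Dict Char Int × Int × Int × Int × Int) :
    pvInv cs k st → k ≤ cs.length := by
  rintro ⟨s, l, -, -, -, -, h5, -⟩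
  exact h5

lemma pvFoldA_inv (cs : List Char) :
    ∀ (rest : List Char) (k : Nat)
      (st : PySem.Dict Char Int × Int × Int × Int × Int),
      cs.drop k = rest → pvInv cs k st →
      pvInv cs cs.length ((PySem.List.enumerate rest (k : Int)).foldl (pvStepA cs) st) := by
  intro rest
  induction rest with
  | nil =>
    intro k st hdrop hinv
    have hk : cs.length ≤ k := by
      have := congrArg List.length hdrop
      simp at this
      omega
    have hk2 : k ≤ cs.length := pvInv_le cs k st hinv
    have : k = cs.length := by omega
    subst this
    simpa [PySem.List.enumerate_nil] using hinv
  | cons c rest' ih =>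
    intro k st hdrop hinv
    have hlen : k < cs.length := by
      have := congrArg List.length hdrop
      simp at this
      omega
    have hck : cs[k] = c := by
      have h0 : (cs.drop k)[0]'(by rw [hdrop]; simp) = c := by
        simp only [hdrop]
        rfl
      rw [List.getElem_drop] at h0
      simpa using h0
    have hdrop' : cs.drop (k + 1) = rest' := by
      have h1 : cs.drop (k + 1) = (cs.drop k).drop 1 := by
        rw [List.drop_drop]
      rw [h1, hdrop]
      rfl
    rw [PySem.List.enumerate_cons, List.foldl_cons]
    have hstep := pvStepA_inv cs k hlen st hinv
    rw [hck] at hstep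
    have := ih (k + 1) (pvStepA cs st ((k : Int), c)) hdrop' hstep
    rw [show ((k : Int) + 1) = ((k + 1 : Nat) : Int) by push_cast; ring]
    exact this

lemma pvInv_init (cs : List Char) : pvInv cs 0 (pvInitCounts, 0, 0, 0, 0) := by
  refine ⟨0, 0, by simp, by simp, le_refl _, le_refl _, Nat.zero_le _,
    fun i hi h1 h2 => by omega, Or.inl rfl, ?_, pvInit_contains, ?_, ?_,
    fun m h1 h2 => by omega, rfl⟩
  · intro c hc
    rw [pvWin_nil]
    simp [pvInit_getD c hc]
  · simp [pvWin_nil, pvDv_nil]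
  · rw [pvWin_nil, pvDv_nil]
    omega

-- ===== VERDICT (by name: the statement is the Claim_ definition above) =====
theorem countVowelSubstrings1_spec : Claim_equal_countVowelSubstrings1 := by
  intro word _
  unfold Spec_countVowelSubstrings1 countVowelSubstrings1 countVowelSubstrings1_alt
  have h := pvFoldA_inv word.toList word.toList 0 (pvInitCounts, 0, 0, 0, 0) rfl
    (pvInv_init word.toList)
  obtain ⟨s, l, -, -, -, -, -, -, -, -, -, -, -, -, hsubs⟩ := h
  exact hsubs
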